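-- pv_equiv track=rewrite | github.com/djoproject/pyshell | pyshell/command/utils.py | isValidMap
-- ===== SOURCE A (Python) =====
-- def isValidMap(emap, expectedLength):
--     if emap == None:
--         return True
--
--     if not isinstance(emap,list):
--         return False
--
--     if len(emap) != expectedLength:
--         return False
--
--     falseCount = 0
--     for b in emap:
--         if type(b) != bool:
--             return False
--
--         if not b:
--             falseCount += 1
--
--     if falseCount == len(emap):
--         return False
--
--     return True
-- ===== SOURCE B (Python) =====
-- def isValidMap(emap, expectedLength):
--     if emap is None:
--         return True
--     return isinstance(emap, list) and len(emap) == expectedLength and True in emap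
-- ===== Notes on version B (the rewrite author's own statement) =====
-- stated objective: idiomatic
-- what changed: Drops the per-element falseCount accumulator loop and the falseCount == len(emap) comparison entirely: the 'not all False' condition becomes a single short-circuiting membership test 'True in emap', and the three guards collapse into one boolean conjunction.
import Mathlib
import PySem

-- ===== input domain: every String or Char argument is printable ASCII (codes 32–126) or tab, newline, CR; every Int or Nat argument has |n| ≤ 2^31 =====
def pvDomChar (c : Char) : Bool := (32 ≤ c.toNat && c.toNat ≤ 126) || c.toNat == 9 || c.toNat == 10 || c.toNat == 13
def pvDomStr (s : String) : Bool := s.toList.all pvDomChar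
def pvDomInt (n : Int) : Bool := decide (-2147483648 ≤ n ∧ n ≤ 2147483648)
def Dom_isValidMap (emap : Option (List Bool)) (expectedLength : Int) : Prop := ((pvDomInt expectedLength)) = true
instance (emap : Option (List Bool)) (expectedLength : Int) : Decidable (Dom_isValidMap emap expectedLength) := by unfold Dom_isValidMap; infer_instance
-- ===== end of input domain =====

-- B replaces A's falseCount accumulator loop with a short-circuit membership test (True in emap); idiomatic, same cost.


-- ===== PORT A =====
-- literal port: the isinstance and type(b) checks are vacuously true under the Lean typing
def isValidMap (emap : Option (List Bool)) (expectedLength : Int) : Bool :=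
  match emap with
  | none => true
  | some l =>
    if (l.length : Int) ≠ expectedLength then false
    else
      let falseCount := l.foldl (fun c b => if !b then c + 1 else c) (0 : Int)
      if falseCount = (l.length : Int) then false
      else true

-- ===== PORT B =====
-- literal port of Source B: 'isinstance(emap, list)' is vacuously true under the Lean typing;
-- 'True in emap' is the membership test l.contains true
def isValidMap_alt (emap : Option (List Bool)) (expectedLength : Int) : Bool :=
  match emap with
  | none => true
  | some l => decide ((l.length : Int) = expectedLength) && l.contains true

-- ===== PRECONDITION & SPEC =====
def Spec_isValidMap (emap : Option (List Bool)) (expectedLength : Int) (out : Bool) : Prop := out = isValidMap_alt emap expectedLength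
instance (emap : Option (List Bool)) (expectedLength : Int) (out : Bool) : Decidable (Spec_isValidMap emap expectedLength out) := by unfold Spec_isValidMap; infer_instance

-- ===== CLAIM (what is proved, stated in full; the proofs are below) =====
def Claim_equal_isValidMap : Prop := ∀ (emap : Option (List Bool)) (expectedLength : Int), Dom_isValidMap emap expectedLength → Spec_isValidMap emap expectedLength (isValidMap emap expectedLength)

-- ===== LEMMAS AND PROOFS =====
theorem falseCount_eq_countP (l : List Bool) (n : Int) :
    l.foldl (fun c b => if !b then c + 1 else c) n = n + (l.countP (fun b => !b) : Int) := by
  induction l generalizing n with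
  | nil => simp
  | cons b t ih =>
    simp only [List.foldl_cons, List.countP_cons, ih]
    cases b <;> simp <;> ring

theorem count_full_iff_not_contains (l : List Bool) :
    ((l.countP (fun b => !b) : Int) = (l.length : Int)) ↔ l.contains true = false := by
  rw [Int.natCast_inj (m := l.countP _)]
  constructor
  · intro h
    simp only [List.contains_eq_mem, decide_eq_false_iff_not]
    intro hmem
    have := (List.countP_eq_length (p := fun b => !b) (l := l)).1 h true hmem
    simp at this
  · intro h
    rw [List.countP_eq_length]
    intro b hb
    cases b
    · simp
    · simp only [List.contains_eq_mem, decide_eq_false_iff_not] at h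
      exact absurd hb h

-- ===== VERDICT (by name: the statement is the Claim_ definition above) =====
theorem isValidMap_spec : Claim_equal_isValidMap := by
  intro emap expectedLength _
  unfold Spec_isValidMap isValidMap isValidMap_alt
  cases emap with
  | none => rfl
  | some l =>
    simp only [falseCount_eq_countP, zero_add]
    by_cases h1 : (l.length : Int) ≠ expectedLength
    · rw [if_pos h1]
      simp [h1]
    · rw [if_neg h1]
      push_neg at h1
      cases hC : l.contains true
      · rw [if_pos ((count_full_iff_not_contains l).2 hC)]
        simp [hC]
      · rw [if_neg (fun h => by rw [(count_full_iff_not_contains l).1 h] at hC; exact Bool.noConfusion hC)]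
        simp [h1, hC]
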